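-- pv_equiv track=rewrite | github.com/Rima-01/Python_assign1_abbr | scored_abbreviation_final.py | get_first_letter_indices
-- ===== SOURCE A (Python) =====
-- def get_first_letter_indices(sentence):
--     # Initialising lists to store the first letters and their indices, while keeping track of indices
--     indices = []
--     letters = []
--     for i, char in enumerate(sentence):
--         # Checking if it's the start of a word
--         if (i == 0 or sentence[i-1] == ' ') and char.isalpha():
--             indices.append(i)
--             letters.append(sentence[i])
--
--      # Handling the case for single-word names, like 'Alder'. This manupulation is done for easier comparison of indices, later on for score calculation
--     if len(indices) == 1:
--         indices = [indices[0], indices[0], indices[0]]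
--         letters = [letters[0], letters[0], letters[0]]
--
--     # Handling the case for two-word names, like 'Crab Apple'. This manupulation is done for easier comparison of indices, later on for score calculation
--     elif len(indices) == 2:
--         indices = [indices[0], indices[1], indices[1]]
--         letters = [letters[0], letters[1], letters[1]]
--
--     return indices, letters
-- ===== SOURCE B (Python) =====
-- def get_first_letter_indices(sentence):
--     # Token walk: split on the literal single space and keep a running offset,
--     # instead of scanning every character with a look-back at the previous one.
--     indices = []
--     letters = []
--     pos = 0
--     for token in sentence.split(' '):
--         if token and token[0].isalpha():
--             indices.append(pos)
--             letters.append(token[0])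
--         pos += len(token) + 1
--     if len(indices) == 1:
--         indices = [indices[0], indices[0], indices[0]]
--         letters = [letters[0], letters[0], letters[0]]
--     elif len(indices) == 2:
--         indices = [indices[0], indices[1], indices[1]]
--         letters = [letters[0], letters[1], letters[1]]
--     return indices, letters
-- ===== Notes on version B (the rewrite author's own statement) =====
-- stated objective: alternative
-- what changed: B tokenizes with sentence.split(' ') and walks tokens with a running offset, instead of A's per-character scan with a look-back at the previous character.
import Mathlib
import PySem

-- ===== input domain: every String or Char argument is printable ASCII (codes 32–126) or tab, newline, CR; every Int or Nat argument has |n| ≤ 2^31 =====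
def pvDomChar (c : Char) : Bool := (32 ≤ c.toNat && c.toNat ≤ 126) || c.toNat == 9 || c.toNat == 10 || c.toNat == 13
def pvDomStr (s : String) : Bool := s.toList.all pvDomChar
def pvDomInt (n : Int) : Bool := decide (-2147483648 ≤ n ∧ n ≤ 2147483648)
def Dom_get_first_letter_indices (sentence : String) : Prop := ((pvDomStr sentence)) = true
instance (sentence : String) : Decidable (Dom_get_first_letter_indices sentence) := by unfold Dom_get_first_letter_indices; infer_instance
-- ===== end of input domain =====

-- B replaces A's per-character scan (with look-back at the previous character) by a
-- token walk over sentence.split(' ') carrying a running offset; same result, proved equal.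

-- ===== PORT A =====
-- loop body: if (i == 0 or sentence[i-1] == ' ') and char.isalpha(): append i / sentence[i]
-- (sentence[i] in the body is the current loop character char, appended as a 1-char string)
def stepA (s : List Char) (acc : List Int × List String) (p : Int × Char) : List Int × List String :=
  if ((p.1 == 0) || (PySem.List.pyGet? s (p.1 - 1) == some ' ')) && PySem.Chars.isalpha p.2 then
    (acc.1 ++ [p.1], acc.2 ++ [String.mk [p.2]])
  else acc

-- per-character loop over enumerate(sentence), then the 1-/2-hit padding tail
def get_first_letter_indices (sentence : String) : List Int × List String :=
  let s := sentence.toList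
  let r := (PySem.List.enumerate s 0).foldl (stepA s) ([], [])
  let indices := r.1
  let letters := r.2
  if indices.length == 1 then
    ([indices.getD 0 0, indices.getD 0 0, indices.getD 0 0],
     [letters.getD 0 "", letters.getD 0 "", letters.getD 0 ""])
  else if indices.length == 2 then
    ([indices.getD 0 0, indices.getD 1 0, indices.getD 1 0],
     [letters.getD 0 "", letters.getD 1 "", letters.getD 1 ""])
  else (indices, letters)

-- ===== PORT B =====
-- loop body: if token and token[0].isalpha(): append pos / token[0]; then pos += len(token) + 1
def stepB (st : List Int × List String × Int) (token : List Char) : List Int × List String × Int :=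
  match token with
  | [] => (st.1, st.2.1, st.2.2 + ((0 : Int) + 1))
  | c :: rest =>
    if PySem.Chars.isalpha c then
      (st.1 ++ [st.2.2], st.2.1 ++ [String.mk [c]], st.2.2 + (((c :: rest).length : Int) + 1))
    else (st.1, st.2.1, st.2.2 + (((c :: rest).length : Int) + 1))

-- token walk over sentence.split(' ') with a running offset, then the same padding tail
def get_first_letter_indices_alt (sentence : String) : List Int × List String :=
  let r := (PySem.Chars.splitOn sentence.toList [' ']).foldl stepB ([], [], 0)
  let indices := r.1
  let letters := r.2.1
  if indices.length == 1 then
    ([indices.getD 0 0, indices.getD 0 0, indices.getD 0 0],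
     [letters.getD 0 "", letters.getD 0 "", letters.getD 0 ""])
  else if indices.length == 2 then
    ([indices.getD 0 0, indices.getD 1 0, indices.getD 1 0],
     [letters.getD 0 "", letters.getD 1 "", letters.getD 1 ""])
  else (indices, letters)

-- ===== PRECONDITION & SPEC =====
def Spec_get_first_letter_indices (sentence : String) (out : List Int × List String) : Prop := out = get_first_letter_indices_alt sentence
instance (sentence : String) (out : List Int × List String) : Decidable (Spec_get_first_letter_indices sentence out) := by unfold Spec_get_first_letter_indices; infer_instance

-- ===== CLAIM (what is proved, stated in full; the proofs are below) =====
def Claim_equal_get_first_letter_indices : Prop := ∀ (sentence : String), Dom_get_first_letter_indices sentence → Spec_get_first_letter_indices sentence (get_first_letter_indices sentence)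

-- ===== LEMMAS AND PROOFS =====

-- Word-start scan: the common intermediate form. `start` says whether the current
-- position begins a word (string start or previous char was ' ').
def scanW (start : Bool) (pos : Int) : List Char → List (Int × Char)
  | [] => []
  | c :: cs =>
    (if start && PySem.Chars.isalpha c then [(pos, c)] else []) ++ scanW (c == ' ') (pos + 1) cs

def startOf (u : List Char) : Bool :=
  match u.getLast? with
  | none => true
  | some c => c == ' '

-- Token-walk form of the scan, over a token list with a running offset.
def gTok (pos : Int) : List (List Char) → List (Int × Char)
  | [] => []
  | t :: ts =>
    (match t with
     | [] => []
     | c :: _ => if PySem.Chars.isalpha c then [(pos, c)] else []) ++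
    gTok (pos + (t.length : Int) + 1) ts

theorem scanW_cons (start : Bool) (pos : Int) (c : Char) (cs : List Char) :
    scanW start pos (c :: cs) =
      (if start && PySem.Chars.isalpha c then [(pos, c)] else []) ++ scanW (c == ' ') (pos + 1) cs := rfl

-- A's loop over a suffix v of s = u ++ v equals the scan continued with startOf u.
theorem foldA_eq_scanW (v u : List Char) (ind : List Int) (lets : List String) :
    (PySem.List.enumerate v (u.length : Int)).foldl (stepA (u ++ v)) (ind, lets)
    = (ind ++ (scanW (startOf u) (u.length : Int) v).map (·.1),
       lets ++ (scanW (startOf u) (u.length : Int) v).map (fun p => String.mk [p.2])) := by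
  induction v generalizing u ind lets with
  | nil => simp [scanW]
  | cons c cs ih =>
    rw [PySem.List.enumerate_cons, List.foldl_cons, scanW_cons]
    have hcond : (((u.length : Int) == 0) || (PySem.List.pyGet? (u ++ c :: cs) ((u.length : Int) - 1) == some ' '))
        = startOf u := by
      cases u using List.reverseRecOn with
      | nil => simp [startOf]
      | append_singleton u' a =>
        have hlen : ((u' ++ [a]).length : Int) - 1 = ((u'.length : Nat) : Int) := by
          simp
        rw [hlen, PySem.List.pyGet?_natCast]
        have hget : (u' ++ [a] ++ c :: cs)[u'.length]? = some a := by
          rw [List.append_assoc, List.getElem?_append_right (by simp)]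
          simp
        rw [hget]
        simp only [startOf, List.getLast?_concat]
        simp
        intro h'
        exact absurd h' (by omega)
    have hstep : stepA (u ++ c :: cs) (ind, lets) ((u.length : Int), c)
        = (ind ++ ((if startOf u && PySem.Chars.isalpha c then [((u.length : Int), c)] else []).map (·.1)),
           lets ++ ((if startOf u && PySem.Chars.isalpha c then [((u.length : Int), c)] else []).map (fun p => String.mk [p.2]))) := by
      unfold stepA
      rw [hcond]
      split <;> simp
    have harr : ((u.length : Int)) + 1 = (((u ++ [c]).length : Nat) : Int) := by simp
    have hsplit : u ++ c :: cs = (u ++ [c]) ++ cs := by simp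
    have hstart : startOf (u ++ [c]) = (c == ' ') := by simp [startOf]
    rw [hstep, harr, hsplit, ih (u ++ [c]), hstart]
    simp

theorem modifyHead_fun_id {α : Type} (l : List α) : l.modifyHead (fun x => x) = l := by
  cases l <;> rfl

-- PySem's fueled splitOn on the single-space separator is Mathlib's List.splitOn.
theorem splitOn_go_eq (fuel : Nat) (l cur : List Char) (accs : List (List Char))
    (h : l.length < fuel) :
    PySem.Chars.splitOn.go [' '] fuel l cur accs
      = accs.reverse ++ (l.splitOn ' ').modifyHead (cur.reverse ++ ·) := by
  induction fuel generalizing l cur accs with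
  | zero => omega
  | succ fuel ih =>
    cases l with
    | nil =>
      simp [PySem.Chars.splitOn.go, List.splitOn, List.splitOnP, List.splitOnP.go]
    | cons c rest =>
      rw [PySem.Chars.splitOn.go]
      by_cases hc : c = ' '
      · subst hc
        have hpre : [' '].isPrefixOf (' ' :: rest) = true := by simp [List.isPrefixOf]
        rw [if_pos hpre]
        have := ih rest [] (cur.reverse :: accs) (by simp only [List.length_cons] at h; omega)
        simpa [List.splitOn, List.splitOnP_cons, modifyHead_fun_id] using this
      · have hpre : [' '].isPrefixOf (c :: rest) = false := by
          simp [List.isPrefixOf]; exact fun hh => hc hh.symm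
        rw [if_neg (by simp [hpre])]
        have := ih rest (c :: cur) accs (by simp only [List.length_cons] at h; omega)
        rw [this]
        have hsp2 : (c :: rest).splitOn ' ' = (rest.splitOn ' ').modifyHead (c :: ·) := by
          simp [List.splitOn, List.splitOnP_cons, hc]
        rw [hsp2]
        rcases hsp : rest.splitOn ' ' with _ | ⟨t, ts⟩
        · exact absurd hsp (List.splitOnP_ne_nil _ rest)
        · simp [List.modifyHead]

theorem splitOn_space_eq (l : List Char) :
    PySem.Chars.splitOn l [' '] = l.splitOn ' ' := by
  have := splitOn_go_eq (l.length + 1) l [] [] (by omega)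
  simpa [PySem.Chars.splitOn, modifyHead_fun_id] using this

-- The token walk equals the word-start scan (mutual statement over splitOn's recursion).
theorem gTok_splitOn (cs : List Char) :
    (∀ pos : Int, gTok pos (cs.splitOn ' ') = scanW true pos cs) ∧
    (∀ (pos : Int) (t : List Char) (ts : List (List Char)),
      cs.splitOn ' ' = t :: ts → scanW false pos cs = gTok (pos + (t.length : Int) + 1) ts) := by
  induction cs with
  | nil =>
    constructor
    · intro pos; simp [List.splitOn, List.splitOnP, List.splitOnP.go, gTok, scanW]
    · intro pos t ts h
      simp [List.splitOn, List.splitOnP, List.splitOnP.go] at h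
      obtain ⟨h1, h2⟩ := h
      subst h1; subst h2; simp [scanW, gTok]
  | cons c cs ih =>
    obtain ⟨ih1, ih2⟩ := ih
    by_cases hc : c = ' '
    · subst hc
      have hsp : (' ' :: cs).splitOn ' ' = [] :: cs.splitOn ' ' := by
        simp [List.splitOn, List.splitOnP_cons]
      constructor
      · intro pos
        rw [hsp, scanW_cons]
        have ha : PySem.Chars.isalpha ' ' = false := rfl
        simp [gTok, ha, ih1]
      · intro pos t ts h
        rw [hsp] at h
        injection h with h1 h2
        subst h1; subst h2
        rw [scanW_cons]
        simp [ih1]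
    · have hne := List.splitOnP_ne_nil (fun x => x == ' ') cs
      rcases hsp0 : cs.splitOn ' ' with _ | ⟨t', ts'⟩
      · exact absurd hsp0 hne
      · have hsp : (c :: cs).splitOn ' ' = (c :: t') :: ts' := by
          simp [List.splitOn, List.splitOnP_cons, hc]
          simp [List.splitOn] at hsp0
          simp [hsp0, List.modifyHead]
        have harith : ∀ pos : Int, pos + (((c :: t').length : Nat) : Int) + 1
            = pos + 1 + ((t'.length : Nat) : Int) + 1 := by
          intro pos
          have hl : (((c :: t').length : Nat) : Int) = ((t'.length : Nat) : Int) + 1 := by simp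
          rw [hl]; ring
        constructor
        · intro pos
          rw [hsp, scanW_cons]
          have hcb : (c == ' ') = false := by simp [hc]
          simp only [gTok, hcb]
          rw [harith pos, ← ih2 (pos + 1) t' ts' hsp0]
          simp
        · intro pos t ts h
          rw [hsp] at h
          injection h with h1 h2
          subst h1; subst h2
          have hcb : (c == ' ') = false := by simp [hc]
          rw [scanW_cons, hcb]
          rw [harith pos, ih2 (pos + 1) t' ts' hsp0]
          simp

-- B's fold over the token list equals the accumulators extended by gTok's pairs.
theorem foldB_eq_gTok (ts : List (List Char)) (ind : List Int) (lets : List String) (pos : Int) :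
    ts.foldl stepB (ind, lets, pos)
    = (ind ++ (gTok pos ts).map (·.1),
       lets ++ (gTok pos ts).map (fun p => String.mk [p.2]),
       pos + ((ts.map (fun t => (t.length : Int) + 1)).sum)) := by
  induction ts generalizing ind lets pos with
  | nil => simp [gTok]
  | cons t ts ih =>
    cases t with
    | nil =>
      rw [List.foldl_cons]
      simp only [gTok, stepB]
      rw [ih]
      simp [add_assoc]
    | cons c rest =>
      rw [List.foldl_cons]
      simp only [gTok, stepB]
      by_cases hα : PySem.Chars.isalpha c
      · simp only [hα, if_true]
        rw [ih]
        simp [Prod.ext_iff, add_assoc]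
      · simp only [hα]
        rw [if_neg (by simp [hα]), if_neg (by simp [hα]), ih]
        simp [Prod.ext_iff, add_assoc]

-- ===== VERDICT (by name: the statement is the Claim_ definition above) =====
theorem get_first_letter_indices_spec : Claim_equal_get_first_letter_indices := by
  intro sentence _
  unfold Spec_get_first_letter_indices
  have hs0 : startOf ([] : List Char) = true := rfl
  have hA := foldA_eq_scanW sentence.toList [] [] []
  rw [hs0] at hA
  simp only [List.nil_append, List.length_nil, Nat.cast_zero] at hA
  have hB := foldB_eq_gTok (PySem.Chars.splitOn sentence.toList [' ']) [] [] 0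
  have hsw : gTok 0 (PySem.Chars.splitOn sentence.toList [' ']) = scanW true 0 sentence.toList := by
    rw [splitOn_space_eq, (gTok_splitOn sentence.toList).1 0]
  rw [hsw] at hB
  simp only [get_first_letter_indices, get_first_letter_indices_alt]
  rw [hA, hB]
  simp
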